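-- pv_equiv track=rewrite | github.com/santhoshrc2210/Algorithims | project_dice_game.py | find_the_best_dice
-- ===== SOURCE A (Python) =====
-- from itertools import combinations
--
-- def count_wins(dice1, dice2):
--     pos_comb=[]
--     dice1_wins=0
--     dice2_wins=0
--     for ele in dice1:
--         for ele_2 in dice2:
--             if ele>ele_2:
--                 dice1_wins+=1
--             elif ele_2>ele:
--                 dice2_wins+=1
--     return (dice1_wins,dice2_wins)
--
-- def find_the_best_dice(dices):
--     #list of indices for dices
--     idx_of_dice=range(len(dices))
--     #creating a list to keep scores for dice
--     scores_lst=[]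
--     for idx in range(len(dices)):
--         scores_lst.append(0)
--     #list of all possible combinations
--     comb = combinations(idx_of_dice, 2)
--     for each_comb in list(comb):
--       dices_idx=list(each_comb)
--       scores=count_wins(dices[dices_idx[0]],dices[dices_idx[1]])
--       a=list(scores)
--       if a[0]>a[1]:
--         scores_lst[dices_idx[0]]+=1
--       elif a[1]>a[0]:
--         scores_lst[dices_idx[1]]+=1
--     max_score=len(dices)-1
--     if max_score in scores_lst:
--       return scores_lst.index(max_score)
--     else:
--       return -1
-- ===== SOURCE B (Python) =====
-- def _beats(d1, d2):
--     # positive signed sum <=> d1 wins strictly more face pairs than d2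
--     return sum((x > y) - (y > x) for x in d1 for y in d2) > 0
--
-- def find_the_best_dice(dices):
--     n = len(dices)
--     for i in range(n):
--         if all(_beats(dices[i], dices[j]) for j in range(n) if j != i):
--             return i
--     return -1
-- ===== Notes on version B (the rewrite author's own statement) =====
-- stated objective: simpler
-- what changed: Replaces the combinations-based score table (one point per won pair, then membership test and list.index) by a direct scan that returns the first die beating every other, each duel decided by one signed pair-sum instead of two separate win counters.
import Mathlib
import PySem

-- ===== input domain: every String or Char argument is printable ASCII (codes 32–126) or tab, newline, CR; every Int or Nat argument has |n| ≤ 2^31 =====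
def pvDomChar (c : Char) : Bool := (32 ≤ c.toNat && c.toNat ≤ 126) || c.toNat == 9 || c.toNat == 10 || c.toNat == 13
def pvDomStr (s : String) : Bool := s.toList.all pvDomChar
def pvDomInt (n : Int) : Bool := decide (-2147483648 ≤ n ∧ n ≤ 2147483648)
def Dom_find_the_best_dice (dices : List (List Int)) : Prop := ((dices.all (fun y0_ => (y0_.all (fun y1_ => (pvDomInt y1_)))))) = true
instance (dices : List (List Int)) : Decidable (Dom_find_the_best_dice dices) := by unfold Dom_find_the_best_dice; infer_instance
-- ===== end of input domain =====

-- B replaces A's combinations-based score table (one point per won pair, then membership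
-- test and list.index) by a direct scan returning the first die that beats every other,
-- each duel decided by one signed pair-sum; objective: simpler, same asymptotic cost.

-- ===== PORT A =====
def count_wins (dice1 dice2 : List Int) : Int × Int :=
  dice1.foldl (fun acc ele =>
    dice2.foldl (fun acc2 ele_2 =>
      if ele > ele_2 then (acc2.1 + 1, acc2.2)
      else if ele_2 > ele then (acc2.1, acc2.2 + 1)
      else acc2) acc) (0, 0)

-- list(combinations(range(n), 2)) in Python's order: (i, j) with i < j, lexicographic
def combList (n : Nat) : List (Nat × Nat) :=
  (List.range n).flatMap (fun i => ((List.range n).drop (i+1)).map (fun j => (i, j)))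

-- loop body: scores = count_wins(...); a = list(scores); award the point
-- (indices produced by combinations(range(n), 2) are always in range, so getD/set are exact)
def stepA (dices : List (List Int)) (s : List Int) (p : Nat × Nat) : List Int :=
  let a := count_wins (dices.getD p.1 []) (dices.getD p.2 [])
  if a.1 > a.2 then s.set p.1 (s.getD p.1 0 + 1)
  else if a.2 > a.1 then s.set p.2 (s.getD p.2 0 + 1)
  else s

def find_the_best_dice (dices : List (List Int)) : Int :=
  let n := dices.length
  -- for idx in range(len(dices)): scores_lst.append(0)
  let scores0 : List Int := (List.range n).foldl (fun s _ => s ++ [0]) []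
  let scores := (combList n).foldl (stepA dices) scores0
  let max_score : Int := (n : Int) - 1
  if scores.contains max_score then
    match PySem.List.index? scores max_score with
    | some k => (k : Int)
    | none => -1  -- unreachable: guarded by contains
  else -1

-- ===== PORT B =====
def pyBeats (d1 d2 : List Int) : Bool :=
  decide (0 < d1.foldl (fun s x =>
    d2.foldl (fun t y =>
      t + ((if x > y then (1 : Int) else 0) - (if y > x then 1 else 0))) s) 0)

def find_the_best_dice_alt (dices : List (List Int)) : Int :=
  let n := dices.length
  match (List.range n).find? (fun i =>
      ((List.range n).filter (fun j => j != i)).all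
        (fun j => pyBeats (dices.getD i []) (dices.getD j []))) with
  | some i => (i : Int)
  | none => -1

-- ===== PRECONDITION & SPEC =====
def Spec_find_the_best_dice (dices : List (List Int)) (out : Int) : Prop := out = find_the_best_dice_alt dices
instance (dices : List (List Int)) (out : Int) : Decidable (Spec_find_the_best_dice dices out) := by unfold Spec_find_the_best_dice; infer_instance

-- ===== CLAIM (what is proved, stated in full; the proofs are below) =====
def Claim_equal_find_the_best_dice : Prop := ∀ (dices : List (List Int)), Dom_find_the_best_dice dices → Spec_find_the_best_dice dices (find_the_best_dice dices)

-- ===== LEMMAS AND PROOFS =====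

-- number of faces of d2 strictly below / strictly above x
def wcnt (d2 : List Int) (x : Int) : Int := (d2.countP (fun y => decide (y < x)) : Int)
def lcnt (d2 : List Int) (x : Int) : Int := (d2.countP (fun y => decide (x < y)) : Int)

theorem cw_inner (x : Int) (d2 : List Int) : ∀ a b : Int,
    d2.foldl (fun acc2 ele_2 =>
      if x > ele_2 then (acc2.1 + 1, acc2.2)
      else if ele_2 > x then (acc2.1, acc2.2 + 1)
      else acc2) (a, b) = (a + wcnt d2 x, b + lcnt d2 x) := by
  induction d2 with
  | nil => intro a b; simp [wcnt, lcnt]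
  | cons y d2 ih =>
    intro a b
    simp only [List.foldl_cons]
    by_cases h1 : x > y
    · rw [if_pos h1, ih]
      have h2 : ¬ y > x := by omega
      simp only [wcnt, lcnt, List.countP_cons, h1, h2, decide_true, decide_false,
        if_true, if_false, Prod.mk.injEq]
      push_cast
      omega
    · rw [if_neg h1]
      by_cases h2 : y > x
      · rw [if_pos h2, ih]
        simp only [wcnt, lcnt, List.countP_cons, h1, h2, decide_true, decide_false,
          if_true, if_false, Prod.mk.injEq]
        push_cast
        omega
      · rw [if_neg h2, ih]
        simp only [wcnt, lcnt, List.countP_cons, h1, h2, decide_true, decide_false,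
          if_true, if_false, Prod.mk.injEq]
        push_cast
        omega

theorem cw_aux (d2 : List Int) : ∀ (d1 : List Int) (a b : Int),
    d1.foldl (fun acc ele =>
      d2.foldl (fun acc2 ele_2 =>
        if ele > ele_2 then (acc2.1 + 1, acc2.2)
        else if ele_2 > ele then (acc2.1, acc2.2 + 1)
        else acc2) acc) (a, b)
      = (a + (d1.map (wcnt d2)).sum, b + (d1.map (lcnt d2)).sum) := by
  intro d1
  induction d1 with
  | nil => intro a b; simp
  | cons x d1 ih =>
    intro a b
    simp only [List.foldl_cons]
    rw [cw_inner, ih]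
    simp only [List.map_cons, List.sum_cons, Prod.mk.injEq]
    omega

theorem cw_eq (d1 d2 : List Int) :
    count_wins d1 d2 = ((d1.map (wcnt d2)).sum, (d1.map (lcnt d2)).sum) := by
  unfold count_wins
  rw [cw_aux]
  simp

theorem bsum_inner (x : Int) (d2 : List Int) : ∀ s : Int,
    d2.foldl (fun t y =>
      t + ((if x > y then (1 : Int) else 0) - (if y > x then 1 else 0))) s
      = s + wcnt d2 x - lcnt d2 x := by
  induction d2 with
  | nil => intro s; simp [wcnt, lcnt]
  | cons y d2 ih =>
    intro s
    simp only [List.foldl_cons]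
    rw [ih]
    simp only [wcnt, lcnt, List.countP_cons]
    by_cases h1 : x > y
    · have h2 : ¬ y > x := by omega
      simp only [h1, h2, decide_true, decide_false, if_true, if_false]
      push_cast
      omega
    · by_cases h2 : y > x
      · simp only [h1, h2, decide_true, decide_false, if_true, if_false]
        push_cast
        omega
      · simp only [h1, h2, decide_true, decide_false, if_true, if_false]
        push_cast
        omega

theorem bsum (d1 d2 : List Int) : ∀ s : Int,
    d1.foldl (fun s x =>
      d2.foldl (fun t y =>
        t + ((if x > y then (1 : Int) else 0) - (if y > x then 1 else 0))) s) s
      = s + (d1.map (wcnt d2)).sum - (d1.map (lcnt d2)).sum := by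
  induction d1 with
  | nil => intro s; simp
  | cons x d1 ih =>
    intro s
    simp only [List.foldl_cons]
    rw [bsum_inner, ih]
    simp only [List.map_cons, List.sum_cons]
    omega

-- double counting: pairs (x, y) with y < x, counted by x's or by y's
theorem fub (l1 l2 : List Int) :
    (l1.map (wcnt l2)).sum = (l2.map (lcnt l1)).sum := by
  induction l1 with
  | nil =>
    simp only [List.map_nil, List.sum_nil]
    rw [show l2.map (lcnt []) = l2.map (fun _ => (0 : Int)) from
      List.map_congr_left (fun y _ => by simp [lcnt])]
    rw [PySem.List.sum_map_const_int]
    ring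
  | cons x l1 ih =>
    simp only [List.map_cons, List.sum_cons]
    have hmap : l2.map (lcnt (x :: l1))
        = l2.map (fun y => lcnt l1 y + (if decide (y < x) = true then (1 : Int) else 0)) := by
      apply List.map_congr_left
      intro y _
      simp only [lcnt, List.countP_cons]
      by_cases h : y < x
      · simp [h]
      · simp [h]
    rw [hmap, PySem.List.sum_map_add_int, PySem.List.sum_map_ite_one_zero, ih]
    unfold wcnt
    omega

theorem cw_swap (d1 d2 : List Int) :
    count_wins d1 d2 = ((count_wins d2 d1).2, (count_wins d2 d1).1) := by
  rw [cw_eq d1 d2, cw_eq d2 d1]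
  exact Prod.ext (fub d1 d2) ((fub d2 d1).symm)

-- "die i beats die j" as A computes it
def btA (dices : List (List Int)) (i j : Nat) : Bool :=
  decide ((count_wins (dices.getD i []) (dices.getD j [])).2
            < (count_wins (dices.getD i []) (dices.getD j [])).1)

theorem beats_eq_btA (dices : List (List Int)) (i j : Nat) :
    pyBeats (dices.getD i []) (dices.getD j []) = btA dices i j := by
  unfold pyBeats btA
  rw [bsum, cw_eq]
  rw [decide_eq_decide]
  omega

-- pair p awards a point to index k
def ptA (dices : List (List Int)) (k : Nat) (p : Nat × Nat) : Bool :=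
  if p.1 = k then btA dices p.1 p.2
  else if p.2 = k then btA dices p.2 p.1
  else false

theorem getD_set (s : List Int) (i k : Nat) (v : Int) (h : i < s.length) :
    (s.set i v).getD k 0 = if k = i then v else s.getD k 0 := by
  by_cases hk : k = i
  · subst hk
    simp [List.getD_eq_getElem?_getD, List.getElem?_set, h]
  · simp only [List.getD_eq_getElem?_getD, List.getElem?_set]
    rw [if_neg (fun hh => hk (Eq.symm hh)), if_neg hk]

theorem fold_len (dices : List (List Int)) (L : List (Nat × Nat)) : ∀ s : List Int,
    (L.foldl (stepA dices) s).length = s.length := by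
  induction L with
  | nil => intro s; rfl
  | cons p L ih =>
    intro s
    rw [List.foldl_cons, ih]
    simp only [stepA]
    split_ifs <;> simp [List.length_set]

theorem fold_getD (dices : List (List Int)) (L : List (Nat × Nat)) : ∀ (s : List Int) (k : Nat),
    k < s.length → (∀ p ∈ L, p.1 < s.length ∧ p.2 < s.length) →
    (L.foldl (stepA dices) s).getD k 0 = s.getD k 0 + (L.countP (ptA dices k) : Int) := by
  induction L with
  | nil => intro s k _ _; simp
  | cons p L ih =>
    rcases p with ⟨i, j⟩
    intro s k hk hb
    have hij := hb (i, j) List.mem_cons_self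
    have hb' : ∀ q ∈ L, q.1 < s.length ∧ q.2 < s.length := fun q hq => hb q (List.mem_cons_of_mem _ hq)
    rw [List.foldl_cons, List.countP_cons]
    rcases lt_trichotomy (count_wins (dices.getD i []) (dices.getD j [])).2
        (count_wins (dices.getD i []) (dices.getD j [])).1 with hgt | heq | hlt
    · -- a.1 > a.2 : point to i
      have hstep : stepA dices s (i, j) = s.set i (s.getD i 0 + 1) := by
        simp only [stepA]
        rw [if_pos hgt]
      by_cases hik : i = k
      · subst hik
        rw [hstep, ih _ i (by simpa [List.length_set] using hk)
          (fun q hq => by simpa [List.length_set] using hb' q hq)]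
        rw [getD_set s i i _ hij.1]
        have hpt : ptA dices i (i, j) = true := by
          simp only [ptA, btA]
          rw [if_pos trivial]
          exact decide_eq_true hgt
        have hone : (if ptA dices i (i, j) = true then 1 else 0) = 1 := by rw [hpt]; simp
        rw [if_pos rfl, hone]
        push_cast
        ring
      · rw [hstep, ih _ k (by simpa [List.length_set] using hk)
          (fun q hq => by simpa [List.length_set] using hb' q hq)]
        rw [getD_set s i k _ hij.1]
        have hpt : ptA dices k (i, j) = false := by
          simp only [ptA]
          rw [if_neg hik]
          by_cases hjk : j = k
          · subst hjk
            rw [if_pos rfl]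
            simp only [btA]
            rw [cw_swap (dices.getD j []) (dices.getD i [])]
            simp only [decide_eq_false_iff_not]
            omega
          · rw [if_neg hjk]
        have hzero : (if ptA dices k (i, j) = true then 1 else 0) = 0 := by rw [hpt]; simp
        rw [if_neg (fun hh => hik (Eq.symm hh)), hzero]
        push_cast
        ring
    · -- tie: no point awarded
      have hstep : stepA dices s (i, j) = s := by
        simp only [stepA]
        rw [if_neg (by omega), if_neg (by omega)]
      have hpt : ptA dices k (i, j) = false := by
        simp only [ptA]
        split_ifs with h1 h2
        · simp only [btA, decide_eq_false_iff_not]; omega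
        · simp only [btA]
          rw [cw_swap (dices.getD j []) (dices.getD i [])]
          simp only [decide_eq_false_iff_not]
          omega
        · rfl
      have hzero : (if ptA dices k (i, j) = true then 1 else 0) = 0 := by rw [hpt]; simp
      rw [hstep, ih s k hk hb', hzero]
      push_cast
      ring
    · -- a.2 > a.1 : point to j
      have hstep : stepA dices s (i, j) = s.set j (s.getD j 0 + 1) := by
        simp only [stepA]
        rw [if_neg (by omega), if_pos hlt]
      by_cases hjk : j = k
      · subst hjk
        have hij' : i ≠ j := by
          intro h
          rw [h] at hlt
          have heq2 : (count_wins (dices.getD j []) (dices.getD j [])).1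
              = (count_wins (dices.getD j []) (dices.getD j [])).2 := by
            conv_lhs => rw [cw_swap (dices.getD j []) (dices.getD j [])]
          omega
        rw [hstep, ih _ j (by simpa [List.length_set] using hk)
          (fun q hq => by simpa [List.length_set] using hb' q hq)]
        rw [getD_set s j j _ hij.2]
        have hpt : ptA dices j (i, j) = true := by
          simp only [ptA]
          rw [if_neg hij', if_pos trivial]
          simp only [btA]
          rw [cw_swap (dices.getD j []) (dices.getD i [])]
          exact decide_eq_true hlt
        have hone : (if ptA dices j (i, j) = true then 1 else 0) = 1 := by rw [hpt]; simp
        rw [if_pos rfl, hone]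
        push_cast
        ring
      · rw [hstep, ih _ k (by simpa [List.length_set] using hk)
          (fun q hq => by simpa [List.length_set] using hb' q hq)]
        rw [getD_set s j k _ hij.2]
        have hpt : ptA dices k (i, j) = false := by
          simp only [ptA]
          by_cases hik2 : i = k
          · rw [if_pos hik2]
            simp only [btA, decide_eq_false_iff_not]
            subst hik2
            omega
          · rw [if_neg hik2, if_neg hjk]
        have hzero : (if ptA dices k (i, j) = true then 1 else 0) = 0 := by rw [hpt]; simp
        rw [if_neg (fun hh => hjk (Eq.symm hh)), hzero]
        push_cast
        ring

theorem mem_drop_range_lb {n m j : Nat} (h : j ∈ (List.range n).drop m) : m ≤ j ∧ j < n := by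
  refine ⟨?_, List.mem_range.mp (List.mem_of_mem_drop h)⟩
  obtain ⟨t, ht, rfl⟩ := List.mem_iff_getElem.mp h
  rw [List.getElem_drop, List.getElem_range]
  omega

theorem comb_mem {n : Nat} {p : Nat × Nat} (h : p ∈ combList n) : p.1 < n ∧ p.2 < n := by
  simp only [combList, List.mem_flatMap, List.mem_map] at h
  obtain ⟨i, hi, j, hj, rfl⟩ := h
  exact ⟨List.mem_range.mp hi, (mem_drop_range_lb hj).2⟩

theorem countP_drop_range (n m : Nat) (q : Nat → Bool) :
    ((List.range n).drop m).countP q = (List.range n).countP (fun j => decide (m ≤ j) && q j) := by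
  conv_rhs => rw [← List.take_append_drop m (List.range n)]
  rw [List.countP_append]
  have h1 : ((List.range n).take m).countP (fun j => decide (m ≤ j) && q j) = 0 := by
    rw [List.countP_eq_zero]
    intro a ha
    rw [List.take_range] at ha
    have hlt := List.mem_range.mp ha
    have : ¬ m ≤ a := by omega
    simp [this]
  have h2 : ((List.range n).drop m).countP (fun j => decide (m ≤ j) && q j)
      = ((List.range n).drop m).countP q := by
    apply List.countP_congr
    intro x hx
    have := (mem_drop_range_lb hx).1
    simp [this]
  omega

theorem listSum_range (n : Nat) (f : Nat → Nat) :
    ((List.range n).map f).sum = ∑ i ∈ Finset.range n, f i := by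
  induction n with
  | zero => simp
  | succ n ih => rw [List.range_succ]; simp [Finset.sum_range_succ, ih]

theorem countP_range (n : Nat) (p : Nat → Bool) :
    (List.range n).countP p = ∑ j ∈ Finset.range n, if p j = true then 1 else 0 := by
  induction n with
  | zero => simp
  | succ n ih =>
    rw [List.range_succ, List.countP_append, Finset.sum_range_succ, ih]
    simp [List.countP_cons]

theorem count_comb (dices : List (List Int)) (n k : Nat) (hk : k < n) :
    (combList n).countP (ptA dices k)
      = ((List.range n).filter (fun j => j != k)).countP (btA dices k) := by
  rw [combList, List.countP_flatMap]
  have hmap : (List.range n).map (List.countP (ptA dices k) ∘ fun i => ((List.range n).drop (i+1)).map (fun j => (i, j)))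
      = (List.range n).map (fun i => (List.range n).countP (fun j => decide (i + 1 ≤ j) && ptA dices k (i, j))) := by
    apply List.map_congr_left
    intro i _
    simp only [Function.comp]
    rw [List.countP_map, countP_drop_range]
    rfl
  rw [hmap, listSum_range, List.countP_filter, countP_range]
  have hin : ∀ i, (List.range n).countP (fun j => decide (i + 1 ≤ j) && ptA dices k (i, j))
      = ∑ j ∈ Finset.range n, if (decide (i + 1 ≤ j) && ptA dices k (i, j)) = true then 1 else 0 :=
    fun i => countP_range n _
  rw [Finset.sum_congr rfl (fun i _ => hin i)]
  rw [← Finset.add_sum_erase _ _ (Finset.mem_range.mpr hk)]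
  have hFk : (∑ j ∈ Finset.range n, if (decide (k + 1 ≤ j) && ptA dices k (k, j)) = true then 1 else 0)
      = ∑ j ∈ Finset.range n, if (decide (k + 1 ≤ j) && btA dices k j) = true then 1 else 0 := by
    apply Finset.sum_congr rfl
    intro j _
    simp [ptA]
  have hFi : ∀ i ∈ (Finset.range n).erase k,
      (∑ j ∈ Finset.range n, if (decide (i + 1 ≤ j) && ptA dices k (i, j)) = true then 1 else 0)
        = if (decide (i + 1 ≤ k) && btA dices k i) = true then 1 else 0 := by
    intro i hi
    have hik : i ≠ k := (Finset.mem_erase.mp hi).1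
    have : ∀ j ∈ Finset.range n,
        (if (decide (i + 1 ≤ j) && ptA dices k (i, j)) = true then 1 else 0)
          = if j = k then (if (decide (i + 1 ≤ k) && btA dices k i) = true then 1 else 0) else 0 := by
      intro j _
      by_cases hjk : j = k
      · subst hjk
        simp [ptA, hik]
      · simp [ptA, hik, hjk]
    rw [Finset.sum_congr rfl this, Finset.sum_ite_eq' (Finset.range n) k]
    simp [Finset.mem_range.mpr hk]
  rw [Finset.sum_congr rfl hFi]
  have hext : (∑ i ∈ (Finset.range n).erase k, if (decide (i + 1 ≤ k) && btA dices k i) = true then 1 else 0)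
      = ∑ i ∈ Finset.range n, if (decide (i + 1 ≤ k) && btA dices k i) = true then 1 else 0 := by
    rw [← Finset.add_sum_erase _ (fun i => if (decide (i + 1 ≤ k) && btA dices k i) = true then 1 else 0) (Finset.mem_range.mpr hk)]
    have : ¬ (k + 1 ≤ k) := by omega
    simp [this]
  rw [hFk, hext, ← Finset.sum_add_distrib]
  apply Finset.sum_congr rfl
  intro j _
  by_cases hb : btA dices k j = true
  · simp only [hb, Bool.and_true]
    by_cases hjk : j = k
    · subst hjk
      have h1 : ¬ (j + 1 ≤ j) := by omega
      simp [h1]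
    · rcases Nat.lt_or_ge j k with h | h
      · have h1 : ¬ (k + 1 ≤ j) := by omega
        have h2 : j + 1 ≤ k := by omega
        simp [h1, h2, hjk]
      · have h2 : k + 1 ≤ j := by omega
        have h1 : ¬ (j + 1 ≤ k) := by omega
        simp [h1, h2, hjk]
  · have hb' : btA dices k j = false := by
      cases h : btA dices k j
      · rfl
      · exact absurd h hb
    simp [hb']

theorem filter_len {n k : Nat} (hk : k < n) :
    ((List.range n).filter (fun j => j != k)).length = n - 1 := by
  rw [← List.countP_eq_length_filter, countP_range]
  rw [← Finset.add_sum_erase _ _ (Finset.mem_range.mpr hk)]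
  have hk0 : (if (k != k) = true then 1 else 0) = 0 := by simp
  have hrest : (∑ j ∈ (Finset.range n).erase k, if (j != k) = true then 1 else 0)
      = ∑ j ∈ (Finset.range n).erase k, 1 := by
    apply Finset.sum_congr rfl
    intro j hj
    simp [(Finset.mem_erase.mp hj).1]
  rw [hk0, hrest]
  simp [Finset.card_erase_of_mem (Finset.mem_range.mpr hk)]

theorem find?_congr_mem {α : Type} (l : List α) (p q : α → Bool)
    (h : ∀ a ∈ l, p a = q a) : l.find? p = l.find? q := by
  induction l with
  | nil => rfl
  | cons a l ih =>
    by_cases hpa : p a = true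
    · rw [List.find?_cons_of_pos hpa, List.find?_cons_of_pos (by rw [← h a List.mem_cons_self]; exact hpa)]
    · rw [List.find?_cons_of_neg hpa, List.find?_cons_of_neg (by rw [← h a List.mem_cons_self]; exact hpa)]
      exact ih (fun a ha => h a (List.mem_cons_of_mem _ ha))

theorem index?_map_range' (f : Nat → Int) (v : Int) : ∀ (n s : Nat),
    PySem.List.index? ((List.range' s n).map f) v
      = ((List.range' s n).find? (fun k => decide (f k = v))).map (fun k => k - s) := by
  intro n
  induction n with
  | zero => intro s; simp [PySem.List.index?]
  | succ n ih =>
    intro s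
    rw [List.range'_succ, List.map_cons]
    by_cases hv : f s = v
    · rw [hv, PySem.List.index?_cons_self, List.find?_cons_of_pos (by simp [hv])]
      simp
    · rw [PySem.List.index?_cons_of_ne _ hv, List.find?_cons_of_neg (by simp [hv]), ih]
      cases hf : (List.range' (s+1) n).find? (fun k => decide (f k = v)) with
      | none => simp
      | some a =>
        have ha : a ∈ List.range' (s+1) n := List.mem_of_find?_eq_some hf
        have hsa : s + 1 ≤ a := List.left_le_of_mem_range' ha
        simp only [Option.map_some]
        congr 1
        omega

theorem index?_map_range (f : Nat → Int) (v : Int) (n : Nat) :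
    PySem.List.index? ((List.range n).map f) v
      = (List.range n).find? (fun k => decide (f k = v)) := by
  rw [List.range_eq_range', index?_map_range']
  cases (List.range' 0 n).find? (fun k => decide (f k = v)) <;> simp

-- A's final score of die k, and B's "k beats every other die" test
def scoreI (dices : List (List Int)) (k : Nat) : Int :=
  (((List.range dices.length).filter (fun j => j != k)).countP (btA dices k) : Int)

def predB (dices : List (List Int)) (i : Nat) : Bool :=
  ((List.range dices.length).filter (fun j => j != i)).all
    (fun j => pyBeats (dices.getD i []) (dices.getD j []))

theorem getD_map_zero (n k : Nat) :
    ((List.range n).map (fun _ => (0 : Int))).getD k 0 = 0 := by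
  rw [List.getD_eq_getElem?_getD, List.getElem?_map]
  cases (List.range n)[k]? <;> simp

theorem scores_eq (dices : List (List Int)) :
    (combList dices.length).foldl (stepA dices)
        ((List.range dices.length).foldl (fun s _ => s ++ [(0 : Int)]) [])
      = (List.range dices.length).map (scoreI dices) := by
  have h0 : (List.range dices.length).foldl (fun s _ => s ++ [(0 : Int)]) []
      = (List.range dices.length).map (fun _ => (0 : Int)) := by
    simpa using PySem.List.foldl_append_singleton_eq_map
      (fun (_ : Nat) => (0 : Int)) (List.range dices.length) []
  rw [h0]
  apply List.ext_getElem
  · rw [fold_len]; simp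
  · intro k h1 h2
    have hk : k < dices.length := by simpa using h2
    rw [← List.getD_eq_getElem _ 0 h1, ← List.getD_eq_getElem _ 0 h2]
    rw [fold_getD dices _ _ k (by simpa using hk)
      (fun p hp => ⟨by simpa using (comb_mem hp).1, by simpa using (comb_mem hp).2⟩)]
    rw [getD_map_zero, count_comb dices _ k hk]
    rw [List.getD_eq_getElem _ 0 h2, List.getElem_map, List.getElem_range]
    unfold scoreI
    omega

theorem pred_eq (dices : List (List Int)) : ∀ k ∈ List.range dices.length,
    (decide (scoreI dices k = (dices.length : Int) - 1)) = predB dices k := by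
  intro k hk'
  have hk := List.mem_range.mp hk'
  have hflen := filter_len (n := dices.length) (k := k) hk
  have hcle : ((List.range dices.length).filter (fun j => j != k)).countP (btA dices k)
      ≤ dices.length - 1 := by
    rw [← hflen]; exact List.countP_le_length
  have hiff : (scoreI dices k = (dices.length : Int) - 1) ↔ (predB dices k = true) := by
    unfold scoreI predB
    rw [List.all_eq_true]
    constructor
    · intro h j hj
      have hc : (((List.range dices.length).filter (fun j => j != k)).countP (btA dices k))
          = ((List.range dices.length).filter (fun j => j != k)).length := by
        rw [hflen]; omega
      rw [beats_eq_btA]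
      exact List.countP_eq_length.mp hc j hj
    · intro h
      have hc : (((List.range dices.length).filter (fun j => j != k)).countP (btA dices k))
          = ((List.range dices.length).filter (fun j => j != k)).length :=
        List.countP_eq_length.mpr
          (fun j hj => by rw [← beats_eq_btA dices k j]; exact h j hj)
      rw [hflen] at hc
      omega
  cases hpb : predB dices k
  · apply decide_eq_false
    intro hP
    rw [hiff, hpb] at hP
    exact Bool.false_ne_true hP
  · exact decide_eq_true (hiff.mpr hpb)

theorem beq_comm_decide (a b : Int) : (a == b) = decide (b = a) := by
  by_cases h : b = a
  · subst h
    simp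
  · have h2 : a ≠ b := fun hh => h (Eq.symm hh)
    simp [h, h2]

theorem contains_eq_isSome (dices : List (List Int)) :
    ((List.range dices.length).map (scoreI dices)).contains ((dices.length : Int) - 1)
      = ((List.range dices.length).find? (predB dices)).isSome := by
  rw [List.contains_eq_any_beq, List.any_map, ← List.isSome_find?]
  congr 1
  apply find?_congr_mem
  intro k hk
  simp only [Function.comp]
  rw [beq_comm_decide, pred_eq dices k hk]

theorem index?_eq_find? (dices : List (List Int)) :
    PySem.List.index? ((List.range dices.length).map (scoreI dices)) ((dices.length : Int) - 1)
      = (List.range dices.length).find? (predB dices) := by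
  rw [index?_map_range]
  exact find?_congr_mem _ _ _ (pred_eq dices)

-- ===== VERDICT (by name: the statement is the Claim_ definition above) =====
theorem find_the_best_dice_spec : Claim_equal_find_the_best_dice := by
  intro dices _
  show find_the_best_dice dices = find_the_best_dice_alt dices
  simp only [find_the_best_dice, find_the_best_dice_alt]
  rw [scores_eq dices, contains_eq_isSome dices, index?_eq_find? dices]
  rw [show (fun i => ((List.range dices.length).filter (fun j => j != i)).all
      (fun j => pyBeats (dices.getD i []) (dices.getD j []))) = predB dices from rfl]
  cases hf : (List.range dices.length).find? (predB dices) <;> simp [hf]
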